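-- pv_equiv track=rewrite | github.com/czyalex/4003 | scripts/eval/baseline_string_match.py | rank_ae_by_overlap
-- ===== SOURCE A (Python) =====
-- from collections import Counter
--
-- def rank_ae_by_overlap(ae_strings, vocab):
--     counts = Counter()
--     vocab_lower = [v.lower() for v in vocab]
--     for s in ae_strings:
--         low = s.lower()
--         for v in vocab_lower:
--             if v in low:
--                 counts[v] += 1
--     return [term for term, _ in counts.most_common()]
-- ===== SOURCE B (Python) =====
-- from collections import Counter
--
-- def rank_ae_by_overlap(ae_strings, vocab):
--     vocab_lower = [v.lower() for v in vocab]
--     max_len = max((len(v) for v in vocab_lower), default=0)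
--     counts = Counter()
--     for s in ae_strings:
--         low = s.lower()
--         subs = {low[i:i + k] for i in range(len(low) + 1) for k in range(max_len + 1)}
--         counts.update(v for v in vocab_lower if v in subs)
--     return [term for term, _ in counts.most_common()]
-- ===== Notes on version B (the rewrite author's own statement) =====
-- stated objective: alternative
-- what changed: B indexes each string once by building the hash set of all its substrings up to the longest vocab term's length, then tests every vocab term by a single set lookup instead of running a substring search per (string, term) pair.
import Mathlib
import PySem

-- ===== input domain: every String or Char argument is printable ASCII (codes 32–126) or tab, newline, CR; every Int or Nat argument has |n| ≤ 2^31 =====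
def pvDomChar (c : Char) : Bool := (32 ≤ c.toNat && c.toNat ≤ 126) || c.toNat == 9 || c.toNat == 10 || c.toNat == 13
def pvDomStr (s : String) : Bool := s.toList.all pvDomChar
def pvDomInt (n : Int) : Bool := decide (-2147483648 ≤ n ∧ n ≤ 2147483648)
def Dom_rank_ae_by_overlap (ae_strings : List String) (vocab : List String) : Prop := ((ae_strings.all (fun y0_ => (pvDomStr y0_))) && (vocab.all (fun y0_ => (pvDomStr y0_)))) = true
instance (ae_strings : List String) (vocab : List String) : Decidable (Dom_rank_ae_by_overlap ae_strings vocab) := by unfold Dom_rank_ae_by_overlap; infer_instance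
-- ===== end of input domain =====

-- B replaces the inner per-term substring scan of each string by a precomputed hash set of the
-- string's substrings (up to the longest vocab term), so each vocab term costs one set lookup
-- per string instead of a substring search (alternative mechanism; same results).

-- ===== PORT A =====
def rank_ae_by_overlap (ae_strings : List String) (vocab : List String) : List String :=
  let vocab_lower := vocab.map PySem.Str.lower
  let counts := ae_strings.foldl (fun counts s =>
      let low := PySem.Str.lower s
      vocab_lower.foldl (fun counts v =>
        if PySem.Str.isIn v low then counts.modify v 0 (· + 1) else counts) counts)
    (PySem.Dict.empty : PySem.Dict String Int)
  -- Counter.most_common() = sorted(items, key=itemgetter(1), reverse=True), then keep the terms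
  (PySem.List.sorted counts.items (fun p => p.2) true).map (fun p => p.1)

-- ===== PORT B =====
def rank_ae_by_overlap_alt (ae_strings : List String) (vocab : List String) : List String :=
  let vocab_lower := vocab.map PySem.Str.lower
  -- max((len(v) for v in vocab_lower), default=0)
  let max_len : Int := (PySem.List.max? (vocab_lower.map PySem.Str.len) (fun x => x)).getD 0
  let counts := ae_strings.foldl (fun counts s =>
      let low := PySem.Str.lower s
      -- subs = {low[i:i+k] for i in range(len(low)+1) for k in range(max_len+1)}
      let subs := PySem.Set.ofList ((PySem.List.pyRange 0 (PySem.Str.len low + 1) 1).flatMap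
        (fun i => (PySem.List.pyRange 0 (max_len + 1) 1).map
          (fun k => PySem.Str.slice low (some i) (some (i + k)))))
      -- counts.update(v for v in vocab_lower if v in subs)
      (vocab_lower.filter (fun v => PySem.Set.contains subs v)).foldl
        (fun counts v => counts.modify v 0 (· + 1)) counts)
    (PySem.Dict.empty : PySem.Dict String Int)
  (PySem.List.sorted counts.items (fun p => p.2) true).map (fun p => p.1)

-- ===== PRECONDITION & SPEC =====
def Spec_rank_ae_by_overlap (ae_strings : List String) (vocab : List String) (out : List String) : Prop := out = rank_ae_by_overlap_alt ae_strings vocab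
instance (ae_strings : List String) (vocab : List String) (out : List String) : Decidable (Spec_rank_ae_by_overlap ae_strings vocab out) := by unfold Spec_rank_ae_by_overlap; infer_instance

-- ===== CLAIM (what is proved, stated in full; the proofs are below) =====
def Claim_equal_rank_ae_by_overlap : Prop := ∀ (ae_strings : List String) (vocab : List String), Dom_rank_ae_by_overlap ae_strings vocab → Spec_rank_ae_by_overlap ae_strings vocab (rank_ae_by_overlap ae_strings vocab)

-- ===== LEMMAS AND PROOFS =====

-- the substring set of B: v is in it iff v is a substring of low of length at most m
theorem mem_subsList (low v : String) (m : Int) (hm : 0 ≤ m) :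
    (v ∈ (PySem.List.pyRange 0 (PySem.Str.len low + 1) 1).flatMap
        (fun i => (PySem.List.pyRange 0 (m + 1) 1).map
          (fun k => PySem.Str.slice low (some i) (some (i + k))))) ↔
      ((v.toList.length : Int) ≤ m ∧ v.toList <:+: low.toList) := by
  simp only [List.mem_flatMap, List.mem_map, PySem.List.mem_pyRange_one]
  constructor
  · rintro ⟨i, ⟨h0i, hilt⟩, k, ⟨h0k, hklt⟩, rfl⟩
    have htl : (PySem.Str.slice low (some i) (some (i + k))).toList =
        List.take ((i + k).toNat - i.toNat) (List.drop i.toNat low.toList) := by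
      rw [PySem.Str.toList_slice, PySem.Chars.slice_eq_listSlice]
      exact PySem.List.slice_toNat _ h0i (by omega)
    constructor
    · rw [htl]
      have h1 : (List.take ((i + k).toNat - i.toNat) (List.drop i.toNat low.toList)).length ≤
          (i + k).toNat - i.toNat := List.length_take_le _ _
      have h2 : ((i + k).toNat - i.toNat : Int) ≤ k := by omega
      omega
    · rw [htl]
      exact ((List.take_prefix _ _).isInfix).trans ((List.drop_suffix _ _).isInfix)
  · rintro ⟨hlen, p, t, heq⟩
    refine ⟨(p.length : Int), ⟨by positivity, ?_⟩, (v.toList.length : Int), ⟨by positivity, by omega⟩, ?_⟩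
    · have : p.length ≤ low.toList.length := by
        rw [← heq]; simp
      have hlow : PySem.Str.len low = (low.toList.length : Int) := by
        simp [PySem.Str.len_eq]
      omega
    · apply String.toList_inj.mp
      rw [PySem.Str.toList_slice, PySem.Chars.slice_eq_listSlice,
        PySem.List.slice_natCast_add]
      rw [← heq, List.append_assoc, List.drop_left, List.take_left]

-- every lowered vocab term has length at most max_len, and max_len is nonnegative
-- (when the vocab is nonempty; the empty case is handled separately)
theorem len_le_max_len (vocab_lower : List String) (v : String) (hv : v ∈ vocab_lower) :
    (v.toList.length : Int) ≤
        (PySem.List.max? (vocab_lower.map PySem.Str.len) (fun x => x)).getD 0 ∧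
      (0 : Int) ≤ (PySem.List.max? (vocab_lower.map PySem.Str.len) (fun x => x)).getD 0 := by
  have hne : vocab_lower.map PySem.Str.len ≠ [] := by
    simp [List.map_eq_nil_iff]
    rintro rfl; cases hv
  rcases hmx : PySem.List.max? (vocab_lower.map PySem.Str.len) (fun x => x) with _ | m
  · exact absurd ((PySem.List.max?_eq_none_iff _ _).mp hmx) hne
  · have hle : PySem.Str.len v ≤ m :=
      PySem.List.max?_isMax hmx _ (List.mem_map_of_mem hv)
    have hveq : PySem.Str.len v = (v.toList.length : Int) := by simp [PySem.Str.len_eq]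
    have hv0 : (0 : Int) ≤ PySem.Str.len v := by rw [hveq]; positivity
    rw [hveq] at hle
    exact ⟨by simpa using hle, by simp; omega⟩

theorem main_eq (ae_strings vocab : List String) :
    rank_ae_by_overlap ae_strings vocab = rank_ae_by_overlap_alt ae_strings vocab := by
  unfold rank_ae_by_overlap rank_ae_by_overlap_alt
  dsimp only
  rcases hvl : vocab.map PySem.Str.lower with _ | ⟨v0, vrest⟩
  · simp
  rw [← hvl]
  have hv0 : v0 ∈ vocab.map PySem.Str.lower := by rw [hvl]; exact List.mem_cons_self
  congr 3
  apply List.foldl_ext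
  intro counts s _
  set vocab_lower := vocab.map PySem.Str.lower with hvldef
  set max_len : Int := (PySem.List.max? (vocab_lower.map PySem.Str.len) (fun x => x)).getD 0
    with hml
  have hm0 : (0 : Int) ≤ max_len := (len_le_max_len vocab_lower v0 hv0).2
  rw [List.foldl_filter]
  apply List.foldl_ext
  intro d v hv
  have hlen : (v.toList.length : Int) ≤ max_len := (len_le_max_len vocab_lower v hv).1
  have hcond : PySem.Set.contains (PySem.Set.ofList
      ((PySem.List.pyRange 0 (PySem.Str.len (PySem.Str.lower s) + 1) 1).flatMap
        (fun i => (PySem.List.pyRange 0 (max_len + 1) 1).map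
          (fun k => PySem.Str.slice (PySem.Str.lower s) (some i) (some (i + k))))))
      v = PySem.Str.isIn v (PySem.Str.lower s) := by
    rw [Bool.eq_iff_iff]
    rw [show (PySem.Set.contains _ v = true) ↔
        v ∈ PySem.Set.ofList ((PySem.List.pyRange 0 (PySem.Str.len (PySem.Str.lower s) + 1) 1).flatMap
          (fun i => (PySem.List.pyRange 0 (max_len + 1) 1).map
            (fun k => PySem.Str.slice (PySem.Str.lower s) (some i) (some (i + k))))) from by
      simp [PySem.Set.contains]]
    rw [PySem.Set.mem_ofList, mem_subsList _ _ _ hm0, PySem.Str.isIn_iff_infix]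
    exact and_iff_right_of_imp (fun _ => hlen)
  rw [hcond]

-- ===== VERDICT (by name: the statement is the Claim_ definition above) =====
theorem rank_ae_by_overlap_spec : Claim_equal_rank_ae_by_overlap := by
  intro ae_strings vocab _
  unfold Spec_rank_ae_by_overlap
  exact main_eq ae_strings vocab
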